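-- pv_equiv track=rewrite | github.com/josedf2501/Lazor-project | Lazor_Solver.py | If_Win
-- ===== SOURCE A (Python) =====
-- def If_Win(points_position, lazer_path):
--     #merge all lazer_path to all points.
--     all_points_in_path = set()
--     for path in lazer_path:
--         for point in path:
--             all_points_in_path.add(point)
--     #for each points in points_position, if all points is part of lazor_path then win, otherwise lose.
--     for point in points_position:
--         point  = (point[1],point[0])
--         if point not in all_points_in_path:
--             return False
--     return True
-- ===== SOURCE B (Python) =====
-- def If_Win(points_position, lazer_path):
--     # Express the win condition directly: every target (coords swapped)
--     # must lie on at least one laser path; no combined set is built.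
--     return all(any((p[1], p[0]) in path for path in lazer_path)
--                for p in points_position)
-- ===== Notes on version B (the rewrite author's own statement) =====
-- stated objective: simpler
-- what changed: Drops A's pre-built union set of all path points; B checks each target directly with all/any over the paths themselves.
import Mathlib
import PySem

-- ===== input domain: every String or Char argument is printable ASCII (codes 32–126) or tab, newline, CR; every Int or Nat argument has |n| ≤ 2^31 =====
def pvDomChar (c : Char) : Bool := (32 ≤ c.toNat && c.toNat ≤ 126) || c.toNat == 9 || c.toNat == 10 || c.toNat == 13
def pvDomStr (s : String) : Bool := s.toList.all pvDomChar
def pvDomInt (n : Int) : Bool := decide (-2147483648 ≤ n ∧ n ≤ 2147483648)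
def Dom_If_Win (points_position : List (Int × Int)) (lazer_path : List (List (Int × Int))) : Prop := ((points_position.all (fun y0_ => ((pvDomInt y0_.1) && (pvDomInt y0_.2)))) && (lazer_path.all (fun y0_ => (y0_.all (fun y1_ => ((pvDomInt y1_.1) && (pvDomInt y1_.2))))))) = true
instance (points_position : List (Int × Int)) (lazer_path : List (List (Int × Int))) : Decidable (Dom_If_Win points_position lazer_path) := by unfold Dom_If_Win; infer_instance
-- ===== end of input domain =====

-- B drops A's pre-built union set and tests each target directly against the paths (simpler).
-- ===== PORT A =====
-- loop over points_position with A's early `return False`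
def If_Win_loop (points : List (Int × Int)) (all_points_in_path : PySem.Set (Int × Int)) : Bool :=
  match points with
  | [] => true
  | point :: rest =>
    let point' := (point.2, point.1)
    if ¬ PySem.Set.contains all_points_in_path point' then false
    else If_Win_loop rest all_points_in_path

def If_Win (points_position : List (Int × Int)) (lazer_path : List (List (Int × Int))) : Bool :=
  let all_points_in_path :=
    lazer_path.foldl (fun acc path => path.foldl PySem.Set.add acc) PySem.Set.empty
  If_Win_loop points_position all_points_in_path

-- ===== PORT B =====
def If_Win_alt (points_position : List (Int × Int)) (lazer_path : List (List (Int × Int))) : Bool :=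
  points_position.all (fun p => lazer_path.any (fun path => path.contains (p.2, p.1)))

-- ===== PRECONDITION & SPEC =====
def Spec_If_Win (points_position : List (Int × Int)) (lazer_path : List (List (Int × Int))) (out : Bool) : Prop := out = If_Win_alt points_position lazer_path
instance (points_position : List (Int × Int)) (lazer_path : List (List (Int × Int))) (out : Bool) : Decidable (Spec_If_Win points_position lazer_path out) := by unfold Spec_If_Win; infer_instance

-- ===== CLAIM (what is proved, stated in full; the proofs are below) =====
def Claim_equal_If_Win : Prop := ∀ (points_position : List (Int × Int)) (lazer_path : List (List (Int × Int))), Dom_If_Win points_position lazer_path → Spec_If_Win points_position lazer_path (If_Win points_position lazer_path)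

-- ===== LEMMAS AND PROOFS =====

-- ===== VERDICT (by name: the statement is the Claim_ definition above) =====
-- membership in the folded-up set = membership in some path (or the accumulator)
theorem mem_fold_paths (paths : List (List (Int × Int))) (acc : PySem.Set (Int × Int)) (x : Int × Int) :
    x ∈ paths.foldl (fun acc path => path.foldl PySem.Set.add acc) acc ↔
      x ∈ acc ∨ ∃ p ∈ paths, x ∈ p := by
  induction paths generalizing acc with
  | nil => simp
  | cons path rest ih =>
    simp only [List.foldl_cons, ih]
    have hmem : ∀ (l : List (Int × Int)) (a : PySem.Set (Int × Int)),
        x ∈ l.foldl PySem.Set.add a ↔ x ∈ a ∨ x ∈ l := by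
      intro l
      induction l with
      | nil => simp
      | cons y ys ih2 => intro a; simp [ih2, PySem.Set.mem_add]; tauto
    rw [hmem]
    constructor
    · rintro (⟨h | h⟩ | ⟨p, hp, hx⟩)
      · exact Or.inl h
      · exact Or.inr ⟨path, by simp, h⟩
      · exact Or.inr ⟨p, by simp [hp], hx⟩
    · rintro (h | ⟨p, hp, hx⟩)
      · exact Or.inl (Or.inl h)
      · rcases List.mem_cons.mp hp with rfl | hp
        · exact Or.inl (Or.inr hx)
        · exact Or.inr ⟨p, hp, hx⟩

theorem decide_mem_fold (paths : List (List (Int × Int))) (x : Int × Int) :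
    decide (x ∈ paths.foldl (fun acc path => path.foldl PySem.Set.add acc) PySem.Set.empty) =
      paths.any (fun path => decide (x ∈ path)) := by
  rw [Bool.eq_iff_iff]
  simp [mem_fold_paths, PySem.Set.empty]

theorem If_Win_loop_eq_all (pts : List (Int × Int)) (s : PySem.Set (Int × Int)) :
    If_Win_loop pts s = pts.all (fun p => PySem.Set.contains s (p.2, p.1)) := by
  induction pts with
  | nil => simp [If_Win_loop]
  | cons p rest ih =>
    by_cases h : PySem.Set.contains s (p.2, p.1) = true <;>
      simp [If_Win_loop, ih]

theorem If_Win_eq (points_position : List (Int × Int)) (lazer_path : List (List (Int × Int))) :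
    If_Win points_position lazer_path = If_Win_alt points_position lazer_path := by
  unfold If_Win If_Win_alt
  rw [If_Win_loop_eq_all]
  simp only [PySem.Set.contains]
  congr 1
  funext p
  simp only [List.contains_eq_mem]
  exact decide_mem_fold lazer_path (p.2, p.1)

theorem If_Win_spec : Claim_equal_If_Win := by
  intro pts paths _
  exact If_Win_eq pts paths
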